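-- pv_equiv track=rewrite | github.com/Layakk/WKI | kb_injection.py | text2tokens
-- ===== SOURCE A (Python) =====
-- INIT_CMD    = '{'
--
-- END_CMD     = '}'
--
-- KEY_UNION   = '+'
--
-- def text2tokens(text_script: str):
--
--     reading_spc=False
--     append_next=False
--     spc=''
--     token_list = []
--     tokens=[]
--
--     for char in text_script:
--         if not reading_spc:
--             if append_next:
--                 if char == KEY_UNION: # case ++ -> +
--                     append_next=False
--                     token_list.append(tokens)
--                     tokens = [char]
--                     token_list.append(tokens)
--
--                 else:
--                     #append next
--                     tokens.append(char)
--                     token_list.append(tokens)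
--                     append_next=False
--
--                 continue
--
--             if char == INIT_CMD:
--                 #process {
--                 reading_spc=True
--                 spc=char
--
--             elif char == KEY_UNION:
--                 #process +
--                 tokens=token_list.pop()
--                 append_next=True
--
--             else:
--                 #process char
--                 tokens=[char]
--                 token_list.append(tokens)
--         else:
--             spc +=char
--             if char == END_CMD:
--                 #process }
--                 reading_spc=False
--                 tokens=[spc]
--                 token_list.append(tokens)
--             elif char == INIT_CMD: # case {{ -> {
--                 reading_spc=False
--                 tokens=[char]
--                 token_list.append(tokens)
--
--     return token_list
-- ===== SOURCE B (Python) =====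
-- # Index-based lookahead rewrite: no reading/append flags; '{' handled by an
-- # inner scan + slice, '+' by pop + peek at the next character.
-- def text2tokens(text_script: str):
--     out = []
--     i = 0
--     n = len(text_script)
--     while i < n:
--         c = text_script[i]
--         if c == '{':
--             j = i + 1
--             while j < n and text_script[j] != '}' and text_script[j] != '{':
--                 j += 1
--             if j < n:
--                 if text_script[j] == '}':
--                     out.append([text_script[i:j + 1]])
--                 else:  # nested '{' cuts the command short
--                     out.append(['{'])
--             i = j + 1
--         elif c == '+':
--             prev = out.pop()
--             if i + 1 < n:
--                 nxt = text_script[i + 1]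
--                 if nxt == '+':
--                     out.append(prev)
--                     out.append(['+'])
--                 else:
--                     prev.append(nxt)
--                     out.append(prev)
--                 i += 2
--             else:  # trailing '+': popped token is dropped
--                 i += 1
--         else:
--             out.append([c])
--             i += 1
--     return out
-- ===== Notes on version B (the rewrite author's own statement) =====
-- stated objective: alternative
-- what changed: Replaces the two boolean flags (reading_spc/append_next) and per-character state machine with an index-based loop that handles '{' by an inner scan plus a slice and '+' by pop-and-peek at the next character.
import Mathlib
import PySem

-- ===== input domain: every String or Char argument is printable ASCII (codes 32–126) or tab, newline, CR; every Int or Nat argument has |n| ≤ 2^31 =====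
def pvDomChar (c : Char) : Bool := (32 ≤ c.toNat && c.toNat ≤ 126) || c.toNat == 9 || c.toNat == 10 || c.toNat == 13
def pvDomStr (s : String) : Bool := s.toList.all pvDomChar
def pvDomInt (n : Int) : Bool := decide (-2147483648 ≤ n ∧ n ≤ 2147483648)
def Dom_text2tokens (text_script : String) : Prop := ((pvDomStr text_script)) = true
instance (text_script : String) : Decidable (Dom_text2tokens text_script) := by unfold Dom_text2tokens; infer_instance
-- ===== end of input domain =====

-- B replaces A's two-flag state machine with an index/lookahead loop (alternative decomposition, same cost).
-- Pre_ excludes strings starting with '+', on which Python A raises IndexError (pop from empty list).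


-- ===== PORT A =====
-- State of A's for-loop: (reading_spc, append_next, spc, token_list, tokens).
-- spc is a Python string built char by char; it is carried as its List Char (exact on the domain).
def tkStep (st : Bool × Bool × List Char × List (List String) × List String) (c : Char) :
    Bool × Bool × List Char × List (List String) × List String :=
  match st with
  | (reading_spc, append_next, spc, token_list, tokens) =>
    if reading_spc = false then
      if append_next = true then
        if c = '+' then
          -- case ++ -> +
          let token_list := token_list ++ [tokens]
          let tokens := [String.mk [c]]
          (false, false, spc, token_list ++ [tokens], tokens)
        else
          -- append next
          let tokens := tokens ++ [String.mk [c]]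
          (false, false, spc, token_list ++ [tokens], tokens)
      else if c = '{' then
        (true, append_next, [c], token_list, tokens)
      else if c = '+' then
        -- tokens = token_list.pop(); IndexError on empty list is excluded by Pre_
        (false, true, spc, token_list.dropLast, token_list.getLast?.getD [])
      else
        let tokens := [String.mk [c]]
        (false, append_next, spc, token_list ++ [tokens], tokens)
    else
      let spc := spc ++ [c]
      if c = '}' then
        let tokens := [String.mk spc]
        (false, append_next, spc, token_list ++ [tokens], tokens)
      else if c = '{' then
        -- case {{ -> {
        let tokens := [String.mk [c]]
        (false, append_next, spc, token_list ++ [tokens], tokens)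
      else
        (true, append_next, spc, token_list, tokens)

def text2tokens (text_script : String) : List (List String) :=
  (text_script.toList.foldl tkStep (false, false, [], [], [])).2.2.2.1

-- ===== PORT B =====
-- B's inner scan for '{': consume chars until '}' (emit the whole slice) or '{' (emit "{"),
-- returning the token (if any) and the rest of the input.
def altScan : List Char → List Char → Option (List String) × List Char
  | [], _acc => (none, [])
  | c :: rest, acc =>
    if c = '}' then (some [String.mk ('{' :: acc ++ [c])], rest)
    else if c = '{' then (some [String.mk [c]], rest)
    else altScan rest (acc ++ [c])

lemma altScan_length_le : ∀ (cs acc : List Char), (altScan cs acc).2.length ≤ cs.length := by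
  intro cs
  induction cs with
  | nil => intro acc; simp [altScan]
  | cons c rest ih =>
    intro acc
    simp only [altScan]
    split_ifs with h1 h2
    · simp
    · simp
    · exact le_trans (ih (acc ++ [c])) (Nat.le_succ _)

-- B's main loop (B's `while i < n` over the remaining characters and the output so far).
def altGo : List Char → List (List String) → List (List String)
  | [], out => out
  | c :: rest, out =>
    if c = '{' then
      match h : altScan rest [] with
      | (some tok, rest2) => altGo rest2 (out ++ [tok])
      | (none, _) => out
    else if c = '+' then
      -- prev = out.pop(); then peek at the next char
      match rest with
      | [] => out.dropLast           -- trailing '+': popped token dropped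
      | nxt :: rest' =>
        if nxt = '+' then
          altGo rest' (out.dropLast ++ [out.getLast?.getD []] ++ [[String.mk [nxt]]])
        else
          altGo rest' (out.dropLast ++ [out.getLast?.getD [] ++ [String.mk [nxt]]])
    else altGo rest (out ++ [[String.mk [c]]])
termination_by cs _ => cs.length
decreasing_by
  · have := altScan_length_le rest []
    rw [h] at this
    simpa using Nat.lt_succ_of_le this
  · simp
  · simp
  · simp

def text2tokens_alt (text_script : String) : List (List String) :=
  altGo text_script.toList []

-- ===== PRECONDITION & SPEC =====
-- Pre_ excludes exactly the strings starting with '+': there Python A (and Python B) raises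
-- IndexError from list.pop() on an empty list.
def Pre_text2tokens (text_script : String) : Prop := text_script.toList.head? ≠ some '+'
instance (text_script : String) : Decidable (Pre_text2tokens text_script) := by unfold Pre_text2tokens; infer_instance
def pvWitness_text2tokens : String := "{cmd}+x"

def Spec_text2tokens (text_script : String) (out : List (List String)) : Prop := out = text2tokens_alt text_script
instance (text_script : String) (out : List (List String)) : Decidable (Spec_text2tokens text_script out) := by unfold Spec_text2tokens; infer_instance

-- ===== CLAIM (what is proved, stated in full; the proofs are below) =====
def Claim_equal_text2tokens : Prop := ∀ (text_script : String), Dom_text2tokens text_script → Pre_text2tokens text_script → Spec_text2tokens text_script (text2tokens text_script)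

-- ===== LEMMAS AND PROOFS =====

-- While A reads a spacing command (reading_spc = true, spc = '{' :: acc), its remaining fold
-- computes what B's altScan-then-continue computes; hIH supplies the main equivalence on
-- strictly shorter inputs for when the command closes.
lemma read_aux (n : Nat)
    (hIH : ∀ ds : List Char, ds.length < n → ∀ spc tl toks,
      ((ds.foldl tkStep (false, false, spc, tl, toks)).2.2.2.1) = altGo ds tl) :
    ∀ (cs : List Char), cs.length ≤ n → ∀ (acc : List Char) (tl : List (List String)) (toks : List String),
      ((cs.foldl tkStep (true, false, '{' :: acc, tl, toks)).2.2.2.1) =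
        (match altScan cs acc with
         | (some t, r) => altGo r (tl ++ [t])
         | (none, _) => tl) := by
  intro cs
  induction cs with
  | nil => intro _ acc tl toks; simp [altScan]
  | cons c rest ih =>
    intro hlen acc tl toks
    rw [List.foldl_cons]
    have hrest : rest.length < n := Nat.lt_of_lt_of_le (by simp) hlen
    by_cases h1 : c = '}'
    · subst h1
      have hstep : tkStep (true, false, '{' :: acc, tl, toks) '}' =
          (false, false, ('{' :: acc) ++ ['}'],
            tl ++ [[String.mk (('{' :: acc) ++ ['}'])]], [String.mk (('{' :: acc) ++ ['}'])]) := by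
        simp [tkStep]
      rw [hstep, hIH rest hrest]
      simp [altScan]
    · by_cases h2 : c = '{'
      · subst h2
        have hstep : tkStep (true, false, '{' :: acc, tl, toks) '{' =
            (false, false, ('{' :: acc) ++ ['{'], tl ++ [[String.mk ['{']]], [String.mk ['{']]) := by
          simp [tkStep]
        rw [hstep, hIH rest hrest]
        simp [altScan]
      · have hstep : tkStep (true, false, '{' :: acc, tl, toks) c =
            (true, false, '{' :: (acc ++ [c]), tl, toks) := by
          simp [tkStep, h1, h2]
        rw [hstep, ih (Nat.le_of_lt hrest)]
        simp [altScan, h1, h2]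

-- The main invariant: from A's neutral state (both flags false) with output tl, the rest of
-- A's fold produces the same token list as B's loop on the same remaining characters.
lemma main_aux : ∀ (n : Nat) (cs : List Char), cs.length ≤ n →
    ∀ (spc : List Char) (tl : List (List String)) (toks : List String),
      ((cs.foldl tkStep (false, false, spc, tl, toks)).2.2.2.1) = altGo cs tl := by
  intro n
  induction n with
  | zero =>
    intro cs hcs spc tl toks
    have : cs = [] := List.length_eq_zero_iff.mp (Nat.le_zero.mp hcs)
    subst this; simp [altGo]
  | succ n ih =>
    intro cs hcs spc tl toks
    match cs with
    | [] => simp [altGo]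
    | c :: rest =>
      have hrest : rest.length ≤ n := by simpa using hcs
      rw [List.foldl_cons]
      by_cases h1 : c = '{'
      · subst h1
        have hstep : tkStep (false, false, spc, tl, toks) '{' =
            (true, false, ['{'], tl, toks) := by simp [tkStep]
        rw [hstep]
        have hIH : ∀ ds : List Char, ds.length < n → ∀ spc tl toks,
            ((ds.foldl tkStep (false, false, spc, tl, toks)).2.2.2.1) = altGo ds tl :=
          fun ds hds => ih ds (Nat.le_of_lt hds)
        have h3 : (['{'] : List Char) = '{' :: ([] : List Char) := rfl
        rw [h3, read_aux n hIH rest hrest [] tl toks]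
        conv_rhs => rw [altGo.eq_def]
        simp only [if_pos rfl]
        match hsc : altScan rest [] with
        | (some t, r) => simp [hsc]
        | (none, r) => simp [hsc]
      · by_cases h2 : c = '+'
        · subst h2
          have hstep : tkStep (false, false, spc, tl, toks) '+' =
              (false, true, spc, tl.dropLast, tl.getLast?.getD []) := by simp [tkStep]
          rw [hstep]
          match rest with
          | [] => simp [altGo]
          | nxt :: rest' =>
            have hrest' : rest'.length ≤ n := by simp at hrest; omega
            rw [List.foldl_cons]
            by_cases h3 : nxt = '+'
            · subst h3
              have hstep2 : tkStep (false, true, spc, tl.dropLast, tl.getLast?.getD []) '+' =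
                  (false, false, spc,
                    (tl.dropLast ++ [tl.getLast?.getD []]) ++ [[String.mk ['+']]], [String.mk ['+']]) := by
                simp [tkStep]
              rw [hstep2, ih rest' hrest']
              simp [altGo]
            · have hstep2 : tkStep (false, true, spc, tl.dropLast, tl.getLast?.getD []) nxt =
                  (false, false, spc,
                    tl.dropLast ++ [tl.getLast?.getD [] ++ [String.mk [nxt]]],
                    tl.getLast?.getD [] ++ [String.mk [nxt]]) := by
                simp [tkStep, h3]
              rw [hstep2, ih rest' hrest']
              simp [altGo, h3]
        · have hstep : tkStep (false, false, spc, tl, toks) c =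
              (false, false, spc, tl ++ [[String.mk [c]]], [String.mk [c]]) := by
            simp [tkStep, h1, h2]
          rw [hstep, ih rest hrest]
          conv_rhs => rw [altGo.eq_def]
          simp [h1, h2]

-- ===== VERDICT (by name: the statement is the Claim_ definition above) =====
theorem text2tokens_spec : Claim_equal_text2tokens := by
  intro s _ _
  unfold Spec_text2tokens text2tokens text2tokens_alt
  exact main_aux s.toList.length s.toList (le_refl _) [] [] []
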